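-- pv_equiv track=rewrite | github.com/paiml/depyler | examples/hard_sparse_table.py | build_sparse_table
-- ===== SOURCE A (Python) =====
-- def log2_floor(n: int) -> int:
--     """Compute floor(log2(n))."""
--     if n <= 0:
--         return 0
--     result: int = 0
--     val: int = n
--     while val > 1:
--         val = val // 2
--         result = result + 1
--     return result
--
-- def build_sparse_table(arr: list[int]) -> list[int]:
--     """Build sparse table as flat array. Table[k][i] = min of arr[i..i+2^k-1].
--     Layout: table[k * n + i] for k levels, n elements."""
--     n: int = len(arr)
--     if n == 0:
--         return []
--     max_k: int = log2_floor(n) + 1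
--     table: list[int] = []
--     total: int = max_k * n
--     idx: int = 0
--     while idx < total:
--         table.append(0)
--         idx = idx + 1
--     i: int = 0
--     while i < n:
--         table[i] = arr[i]
--         i = i + 1
--     k: int = 1
--     while k < max_k:
--         i = 0
--         half: int = 1
--         p: int = 0
--         while p < k - 1:
--             half = half * 2
--             p = p + 1
--         while i + half * 2 - 1 < n:
--             left_val: int = table[(k - 1) * n + i]
--             right_val: int = table[(k - 1) * n + i + half]
--             if left_val < right_val:
--                 table[k * n + i] = left_val
--             else:
--                 table[k * n + i] = right_val
--             i = i + 1
--         k = k + 1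
--     return table
-- ===== SOURCE B (Python) =====
-- def build_sparse_table(arr: list[int]) -> list[int]:
--     """Build sparse table as flat array. Table[k][i] = min of arr[i..i+2^k-1].
--     Same layout as A, but each level is filled by a direct window minimum over
--     arr instead of the level-to-level doubling recurrence."""
--     n = len(arr)
--     if n == 0:
--         return []
--     max_k = n.bit_length()  # == log2_floor(n) + 1 for n >= 1
--     table = []
--     for k in range(max_k):
--         w = 2 ** k
--         for i in range(n):
--             table.append(min(arr[i:i + w]) if i + w <= n else 0)
--     return table
-- ===== Notes on version B (the rewrite author's own statement) =====
-- stated objective: alternative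
-- what changed: Each level of the flat table is filled independently by a direct window minimum min(arr[i:i+2^k]) (with int.bit_length for the level count), replacing the level-to-level doubling DP, the manual zero-fill/copy loops and the manual log2/power loops.
import Mathlib
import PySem

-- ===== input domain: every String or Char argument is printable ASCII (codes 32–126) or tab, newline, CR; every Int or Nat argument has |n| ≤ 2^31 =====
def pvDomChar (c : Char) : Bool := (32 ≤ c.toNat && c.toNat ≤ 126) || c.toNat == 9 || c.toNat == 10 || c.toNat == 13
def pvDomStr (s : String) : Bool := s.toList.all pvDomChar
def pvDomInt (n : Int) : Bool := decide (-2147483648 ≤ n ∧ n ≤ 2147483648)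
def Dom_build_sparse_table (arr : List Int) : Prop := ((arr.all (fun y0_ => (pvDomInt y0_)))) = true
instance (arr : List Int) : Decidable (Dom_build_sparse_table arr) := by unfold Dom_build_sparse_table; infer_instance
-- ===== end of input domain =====

-- B fills every level of the flat sparse table independently by a direct window minimum
-- (min over arr[i:i+2^k]) instead of A's level-to-level doubling DP; same output, alternative algorithm.

-- ===== PORT A =====

-- 'while val > 1: val = val // 2; result = result + 1'
def log2fLoop (val result : Int) : Int :=
  if 1 < val then log2fLoop (PySem.Int.floordiv val 2) (result + 1) else result
termination_by val.toNat
decreasing_by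
  rw [PySem.Int.floordiv_eq_ediv_of_pos (by omega)]
  omega

def log2_floor (n : Int) : Int :=
  if n ≤ 0 then 0 else log2fLoop n 0

-- 'while idx < total: table.append(0); idx = idx + 1'
def zeroLoop (table : List Int) (idx total : Int) : List Int :=
  if idx < total then zeroLoop (table ++ [0]) (idx + 1) total else table
termination_by (total - idx).toNat
decreasing_by omega

-- 'while i < n: table[i] = arr[i]; i = i + 1'  (0 ≤ i < n = len(arr) inside the loop, so plain
-- Nat indexing with an unreachable default is exact here)
def copyLoop (arr table : List Int) (i n : Int) : List Int :=
  if i < n then copyLoop arr (table.set i.toNat (arr.getD i.toNat 0)) (i + 1) n else table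
termination_by (n - i).toNat
decreasing_by omega

-- 'while p < k - 1: half = half * 2; p = p + 1'
def halfLoop (half p k : Int) : Int :=
  if p < k - 1 then halfLoop (half * 2) (p + 1) k else half
termination_by (k - 1 - p).toNat
decreasing_by omega

-- 'while i + half * 2 - 1 < n: …'  (all indices used are nonnegative and in range in A's run,
-- so Nat indexing with an unreachable default is exact)
def innerLoop (table : List Int) (k n half i : Int) : List Int :=
  if i + half * 2 - 1 < n then
    let left := table.getD ((k - 1) * n + i).toNat 0
    let right := table.getD ((k - 1) * n + i + half).toNat 0
    innerLoop (table.set ((k * n + i).toNat) (if left < right then left else right)) k n half (i + 1)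
  else table
termination_by (n - (i + half * 2 - 1)).toNat
decreasing_by omega

-- 'while k < max_k: …'
def outerLoop (table : List Int) (k maxk n : Int) : List Int :=
  if k < maxk then outerLoop (innerLoop table k n (halfLoop 1 0 k) 0) (k + 1) maxk n else table
termination_by (maxk - k).toNat
decreasing_by omega

def build_sparse_table (arr : List Int) : List Int :=
  let n : Int := arr.length
  if n = 0 then []
  else
    let maxk : Int := log2_floor n + 1
    let table := zeroLoop [] 0 (maxk * n)
    let table := copyLoop arr table 0 n
    outerLoop table 1 maxk n

-- ===== PORT B =====

-- min(arr[i:i+w]); the slice is nonempty whenever this is called (0 ≤ i, i + w ≤ n, 1 ≤ w),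
-- so the .getD 0 default is never taken
def winMin (arr : List Int) (i w : Int) : Int :=
  (PySem.List.min? (PySem.List.slice arr (some i) (some (i + w))) (fun x => x)).getD 0

def build_sparse_table_alt (arr : List Int) : List Int :=
  let n : Int := arr.length
  if n = 0 then []
  else
    -- n.bit_length() = Nat.log2 n + 1 for n ≥ 1 (the only case reached)
    let maxk : Int := Int.ofNat (Nat.log2 n.toNat + 1)
    (PySem.List.pyRange 0 maxk 1).foldl (fun t k =>
      let w : Int := 2 ^ k.toNat
      (PySem.List.pyRange 0 n 1).foldl (fun t i =>
        t ++ [if i + w ≤ n then winMin arr i w else 0]) t) []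

-- ===== PRECONDITION & SPEC =====
def Spec_build_sparse_table (arr : List Int) (out : List Int) : Prop := out = build_sparse_table_alt arr
instance (arr : List Int) (out : List Int) : Decidable (Spec_build_sparse_table arr out) := by unfold Spec_build_sparse_table; infer_instance

-- ===== CLAIM (what is proved, stated in full; the proofs are below) =====
def Claim_equal_build_sparse_table : Prop := ∀ (arr : List Int), Dom_build_sparse_table arr → Spec_build_sparse_table arr (build_sparse_table arr)

-- ===== LEMMAS AND PROOFS =====

-- ---- generic min machinery ----

-- Python's 'min(list)' as a fold from the head; minD [] = 0 is never relied upon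
def minD (l : List Int) : Int :=
  match l with
  | [] => 0
  | x :: t => t.foldl min x

theorem foldl_min_min (t : List Int) (a b : Int) :
    t.foldl min (min a b) = min a (t.foldl min b) := by
  induction t generalizing b with
  | nil => rfl
  | cons x t ih => simp only [List.foldl_cons, min_assoc, ih]

theorem minD_append (l1 l2 : List Int) (h1 : l1 ≠ []) (h2 : l2 ≠ []) :
    minD (l1 ++ l2) = min (minD l1) (minD l2) := by
  match l1, l2 with
  | x :: t, y :: t2 =>
    show ((t ++ y :: t2).foldl min x) = min (t.foldl min x) (t2.foldl min y)
    rw [List.foldl_append]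
    show (t2.foldl min (min (t.foldl min x) y)) = _
    rw [foldl_min_min]

theorem min?_getD_eq_minD (l : List Int) (h : l ≠ []) :
    (PySem.List.min? l (fun x => x)).getD 0 = minD l := by
  match l with
  | x :: t => rw [PySem.List.min?_id_cons]; rfl

-- ---- the common table specification ----

-- min of arr[i .. i+2^k-1], or 0 when the window overruns
def cell (arr : List Int) (k i : Nat) : Int :=
  if i + 2 ^ k ≤ arr.length then minD ((arr.drop i).take (2 ^ k)) else 0

def specCell (arr : List Int) (n j : Nat) : Int := cell arr (j / n) (j % n)

def specList (arr : List Int) (K n : Nat) : List Int :=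
  (List.range (K * n)).map (specCell arr n)

theorem cell_zero (arr : List Int) (i : Nat) (h : i < arr.length) :
    cell arr 0 i = arr.getD i 0 := by
  unfold cell
  rw [if_pos (by omega), pow_zero]
  rw [List.drop_eq_getElem_cons h]
  rw [show (1:Nat) = 0+1 from rfl, List.take_succ_cons, List.take_zero]
  rw [List.getD_eq_getElem?_getD, List.getElem?_eq_getElem h]
  rfl

theorem cell_doubling (arr : List Int) (k i : Nat) (h : i + 2 ^ (k + 1) ≤ arr.length) :
    min (cell arr k i) (cell arr k (i + 2 ^ k)) = cell arr (k + 1) i := by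
  have hpow : 2 ^ (k + 1) = 2 ^ k + 2 ^ k := by ring
  have hp1 : 1 ≤ 2 ^ k := Nat.one_le_two_pow
  have h1 : i + 2 ^ k ≤ arr.length := by omega
  have h2 : i + 2 ^ k + 2 ^ k ≤ arr.length := by omega
  unfold cell
  rw [if_pos h, if_pos (by omega), if_pos (by omega), hpow]
  have hA : (List.take (2 ^ k) (List.drop i arr)) ≠ [] := by
    apply List.ne_nil_of_length_pos
    rw [List.length_take, List.length_drop]
    omega
  have hB : (List.take (2 ^ k) (List.drop (i + 2 ^ k) arr)) ≠ [] := by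
    apply List.ne_nil_of_length_pos
    rw [List.length_take, List.length_drop]
    omega
  rw [List.take_add, List.drop_drop, minD_append _ _ hA hB]
-- ---- B equals the specification ----

theorem B_cell (arr : List Int) (k i : Nat) (hi : i < arr.length) :
    (if (i : Int) + (2:Int) ^ k ≤ (arr.length : Int) then winMin arr (i : Int) ((2:Int) ^ k) else 0)
      = cell arr k i := by
  have hcast : ((2:Int)) ^ k = ((2 ^ k : Nat) : Int) := by push_cast; ring
  have hp1 : 1 ≤ 2 ^ k := Nat.one_le_two_pow
  by_cases hc : i + 2 ^ k ≤ arr.length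
  · rw [if_pos (by rw [hcast]; exact_mod_cast hc)]
    unfold winMin cell
    rw [if_pos hc, hcast, PySem.List.slice_natCast_add]
    apply min?_getD_eq_minD
    apply List.ne_nil_of_length_pos
    rw [List.length_take, List.length_drop]
    omega
  · rw [if_neg (by rw [hcast]; exact_mod_cast hc)]
    unfold cell
    rw [if_neg hc]

theorem B_level (arr : List Int) (k : Nat) (t : List Int) :
    (PySem.List.pyRange 0 (arr.length : Int) 1).foldl
      (fun t i => t ++ [if i + (2:Int) ^ k ≤ (arr.length : Int) then winMin arr i ((2:Int) ^ k) else 0]) t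
      = t ++ (List.range arr.length).map (cell arr k) := by
  rw [PySem.List.foldl_append_singleton_eq_map, PySem.List.pyRange_zero_nat, List.map_map]
  congr 1
  apply List.map_congr_left
  intro i hi
  rw [List.mem_range] at hi
  exact B_cell arr k i hi

theorem specList_succ (arr : List Int) (K n : Nat) (hn : 1 ≤ n) :
    specList arr (K + 1) n = specList arr K n ++ (List.range n).map (cell arr K) := by
  unfold specList
  rw [show (K + 1) * n = K * n + n by ring, List.range_add, List.map_append, List.map_map]
  congr 1
  apply List.map_congr_left
  intro i hi
  rw [List.mem_range] at hi
  unfold specCell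
  have hd : (K * n + i) / n = K := by
    rw [Nat.add_comm, Nat.add_mul_div_right _ _ (by omega), Nat.div_eq_of_lt hi]; omega
  have hm : (K * n + i) % n = i := by
    rw [Nat.add_comm, Nat.add_mul_mod_self_right, Nat.mod_eq_of_lt hi]
  simp only [Function.comp_apply]
  rw [hd, hm]

theorem B_outer (arr : List Int) (hn : 1 ≤ arr.length) (K : Nat) :
    (List.range K).foldl
      (fun t k' =>
        (PySem.List.pyRange 0 (arr.length : Int) 1).foldl
          (fun t i => t ++ [if i + (2:Int) ^ (((k' : Nat) : Int)).toNat ≤ (arr.length : Int)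
                            then winMin arr i ((2:Int) ^ (((k' : Nat) : Int)).toNat) else 0]) t) []
      = specList arr K arr.length := by
  induction K with
  | zero => simp [specList]
  | succ K ih =>
    rw [List.range_succ, List.foldl_append, List.foldl_cons, List.foldl_nil, ih]
    rw [specList_succ arr K arr.length hn]
    simpa using B_level arr K (specList arr K arr.length)

theorem alt_eq_spec (arr : List Int) (h : arr ≠ []) :
    build_sparse_table_alt arr = specList arr (Nat.log2 arr.length + 1) arr.length := by
  have hn : 0 < arr.length := List.length_pos_of_ne_nil h
  show (if (arr.length : Int) = 0 then ([] : List Int) else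
      (PySem.List.pyRange 0 (Int.ofNat (Nat.log2 ((arr.length : Int)).toNat + 1)) 1).foldl
        (fun t k =>
          (PySem.List.pyRange 0 (arr.length : Int) 1).foldl
            (fun t i => t ++ [if i + (2:Int) ^ k.toNat ≤ (arr.length : Int)
                              then winMin arr i ((2:Int) ^ k.toNat) else 0]) t) [])
      = specList arr (Nat.log2 arr.length + 1) arr.length
  rw [if_neg (by exact_mod_cast Nat.pos_iff_ne_zero.mp hn)]
  simp only [Int.toNat_natCast, Int.ofNat_eq_natCast]
  rw [PySem.List.pyRange_zero_nat (Nat.log2 arr.length + 1), List.foldl_map]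
  exact B_outer arr hn (Nat.log2 arr.length + 1)
-- ---- A equals the specification ----

theorem ite_lt_eq_min (a b : Int) : (if a < b then a else b) = min a b := by
  rw [min_def]; split_ifs <;> omega

theorem getD_set_ne (l : List Int) (a b : Nat) (v : Int) (h : a ≠ b) :
    (l.set a v).getD b 0 = l.getD b 0 := by
  simp [List.getD_eq_getElem?_getD, h]

theorem div_mul_add_spec (K n i : Nat) (hn : 0 < n) (hi : i < n) :
    (K * n + i) / n = K ∧ (K * n + i) % n = i := by
  constructor
  · rw [Nat.add_comm, Nat.add_mul_div_right _ _ hn, Nat.div_eq_of_lt hi]; omega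
  · rw [Nat.add_comm, Nat.add_mul_mod_self_right, Nat.mod_eq_of_lt hi]

theorem log2fLoop_spec : ∀ (m : Nat) (val r : Int), 1 ≤ val → val.toNat ≤ m →
    log2fLoop val r = r + (Nat.log2 val.toNat : Int) := by
  intro m
  induction m with
  | zero => intro val r h1 h2; exfalso; omega
  | succ m ih =>
    intro val r h1 h2
    rw [log2fLoop]
    split
    · next hgt =>
      rw [PySem.Int.floordiv_eq_ediv_of_pos (by omega)]
      rw [ih (val / 2) (r + 1) (by omega) (by omega)]
      have hv2 : (val / 2).toNat = val.toNat / 2 := by omega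
      have hlog : Nat.log2 val.toNat = Nat.log2 (val.toNat / 2) + 1 := by
        rw [Nat.log2_def, if_pos (by omega)]
      rw [hv2, hlog]
      push_cast
      ring
    · next hle =>
      have hv : val = 1 := by omega
      subst hv
      norm_num [Nat.log2]

theorem log2_floor_natCast (n : Nat) (h : 1 ≤ n) : log2_floor (n : Int) = (Nat.log2 n : Int) := by
  unfold log2_floor
  rw [if_neg (by exact_mod_cast by omega : ¬ (n : Int) ≤ 0)]
  rw [log2fLoop_spec n (n : Int) 0 (by exact_mod_cast h) (by omega)]
  simp

theorem zeroLoop_spec : ∀ (m : Nat) (table : List Int) (idx total : Int), (total - idx).toNat ≤ m →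
    zeroLoop table idx total = table ++ List.replicate (total - idx).toNat 0 := by
  intro m
  induction m with
  | zero =>
    intro table idx total h
    rw [zeroLoop, if_neg (by omega)]
    have : (total - idx).toNat = 0 := by omega
    rw [this]
    simp
  | succ m ih =>
    intro table idx total h
    rw [zeroLoop]
    split
    · next hlt =>
      rw [ih (table ++ [0]) (idx + 1) total (by omega)]
      rw [List.append_assoc]
      have : (total - idx).toNat = (total - (idx + 1)).toNat + 1 := by omega
      rw [this, List.replicate_succ]
      rfl
    · next hge =>
      have : (total - idx).toNat = 0 := by omega
      rw [this]
      simp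

theorem copyLoop_length (arr : List Int) : ∀ (m : Nat) (table : List Int) (i n : Int),
    (n - i).toNat ≤ m → (copyLoop arr table i n).length = table.length := by
  intro m
  induction m with
  | zero =>
    intro table i n h
    rw [copyLoop, if_neg (by omega)]
  | succ m ih =>
    intro table i n h
    rw [copyLoop]
    split
    · next hlt => rw [ih _ (i + 1) n (by omega), List.length_set]
    · rfl

theorem copyLoop_getElem? (arr : List Int) : ∀ (m : Nat) (table : List Int) (i : Int), 0 ≤ i →
    arr.length ≤ table.length → ((arr.length : Int) - i).toNat ≤ m → ∀ (j : Nat),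
    (copyLoop arr table i (arr.length : Int))[j]? =
      if i ≤ (j : Int) ∧ j < arr.length then arr[j]? else table[j]? := by
  intro m
  induction m with
  | zero =>
    intro table i hi hlen h j
    rw [copyLoop, if_neg (by omega)]
    rw [if_neg (show ¬(i ≤ (j : Int) ∧ j < arr.length) by omega)]
  | succ m ih =>
    intro table i hi hlen h j
    rw [copyLoop]
    split
    · next hlt =>
      rw [ih (table.set i.toNat (arr.getD i.toNat 0)) (i + 1) (by omega)
            (by rw [List.length_set]; exact hlen) (by omega) j]
      by_cases hj : (j : Int) = i
      · have hjt : i.toNat = j := by omega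
        have hjlt : j < arr.length := by omega
        rw [if_neg (show ¬(i + 1 ≤ (j : Int) ∧ j < arr.length) by omega),
            if_pos (show i ≤ (j : Int) ∧ j < arr.length by omega)]
        rw [List.getElem?_set, if_pos hjt, if_pos (show i.toNat < table.length by omega)]
        rw [hjt, List.getD_eq_getElem?_getD, List.getElem?_eq_getElem hjlt]
        rfl
      · rw [List.getElem?_set, if_neg (show ¬ i.toNat = j by omega)]
        by_cases hc : i + 1 ≤ (j : Int) ∧ j < arr.length
        · rw [if_pos hc, if_pos (show i ≤ (j : Int) ∧ j < arr.length by omega)]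
        · rw [if_neg hc, if_neg (show ¬(i ≤ (j : Int) ∧ j < arr.length) by omega)]
    · next hge =>
      rw [if_neg (show ¬(i ≤ (j : Int) ∧ j < arr.length) by omega)]

theorem halfLoop_spec : ∀ (m : Nat) (half p k : Int), (k - 1 - p).toNat ≤ m →
    halfLoop half p k = half * 2 ^ (k - 1 - p).toNat := by
  intro m
  induction m with
  | zero =>
    intro half p k h
    rw [halfLoop, if_neg (by omega)]
    have : (k - 1 - p).toNat = 0 := by omega
    rw [this, pow_zero, mul_one]
  | succ m ih =>
    intro half p k h
    rw [halfLoop]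
    split
    · next hlt =>
      rw [ih (half * 2) (p + 1) k (by omega)]
      have : (k - 1 - p).toNat = (k - 1 - (p + 1)).toNat + 1 := by omega
      rw [this, pow_succ]
      ring
    · next hge =>
      have : (k - 1 - p).toNat = 0 := by omega
      rw [this, pow_zero, mul_one]

theorem halfLoop_one (k : Nat) (hk : 1 ≤ k) :
    halfLoop 1 0 (k : Int) = ((2 ^ (k - 1) : Nat) : Int) := by
  rw [halfLoop_spec (k - 1) 1 0 (k : Int) (by omega)]
  have : ((k : Int) - 1 - 0).toNat = k - 1 := by omega
  rw [this]
  push_cast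
  ring

theorem innerLoop_length : ∀ (m : Nat) (t : List Int) (k n half i : Int),
    (n - (i + half * 2 - 1)).toNat ≤ m → (innerLoop t k n half i).length = t.length := by
  intro m
  induction m with
  | zero =>
    intro t k n half i h
    rw [innerLoop, if_neg (by omega)]
  | succ m ih =>
    intro t k n half i h
    rw [innerLoop]
    split
    · next hlt => rw [ih _ k n half (i + 1) (by omega), List.length_set]
    · rfl
theorem pred_mul_add (k n : Nat) (hk : 1 ≤ k) : (k - 1) * n + n = k * n := by
  cases k with
  | zero => omega
  | succ k' => simp; ring

theorem innerLoop_getElem? (k n half : Nat) (hk : 1 ≤ k) (hh : 1 ≤ half) :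
    ∀ (m : Nat) (t : List Int) (i j : Nat), (k + 1) * n ≤ t.length → n - i ≤ m →
    (innerLoop t (k : Int) (n : Int) (half : Int) (i : Int))[j]? =
      if k * n + i ≤ j ∧ j < (k + 1) * n ∧ j - k * n + 2 * half ≤ n
      then some (min (t.getD ((k - 1) * n + (j - k * n)) 0)
                     (t.getD ((k - 1) * n + (j - k * n) + half) 0))
      else t[j]? := by
  intro m
  induction m with
  | zero =>
    intro t i j hlen hm
    rw [innerLoop, if_neg (show ¬((i : Int) + (half : Int) * 2 - 1 < (n : Int)) by omega)]
    rw [if_neg (show ¬(k * n + i ≤ j ∧ j < (k + 1) * n ∧ j - k * n + 2 * half ≤ n) by omega)]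
  | succ m ih =>
    intro t i j hlen hm
    rw [innerLoop]
    by_cases hg : i + 2 * half ≤ n
    · rw [if_pos (show (i : Int) + (half : Int) * 2 - 1 < (n : Int) by omega)]
      -- reduce the let-bound reads/writes to Nat indices
      have hw : ((k : Int) * (n : Int) + (i : Int)).toNat = k * n + i := by omega
      have hr1 : (((k : Int) - 1) * (n : Int) + (i : Int)).toNat = (k - 1) * n + i := by
        have : ((k : Int) - 1) = ((k - 1 : Nat) : Int) := by omega
        rw [this]; omega
      have hr2 : (((k : Int) - 1) * (n : Int) + (i : Int) + (half : Int)).toNat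
          = (k - 1) * n + i + half := by
        have : ((k : Int) - 1) = ((k - 1 : Nat) : Int) := by omega
        rw [this]; omega
      have hi1 : ((i : Int) + 1) = ((i + 1 : Nat) : Int) := by push_cast; ring
      simp only [hw, hr1, hr2, hi1]
      rw [ih (t.set (k * n + i)
                (if t.getD ((k - 1) * n + i) 0 < t.getD ((k - 1) * n + i + half) 0
                 then t.getD ((k - 1) * n + i) 0 else t.getD ((k - 1) * n + i + half) 0))
            (i + 1) j (by rw [List.length_set]; exact hlen) (by omega)]
      have hset_len : k * n + i < t.length := by
        calc k * n + i < (k + 1) * n := by nlinarith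
        _ ≤ t.length := hlen
      by_cases hc : k * n + i ≤ j ∧ j < (k + 1) * n ∧ j - k * n + 2 * half ≤ n
      · rw [if_pos hc]
        by_cases hji : j = k * n + i
        · -- the cell written this step
          rw [if_neg (show ¬(k * n + (i + 1) ≤ j ∧ j < (k + 1) * n ∧ j - k * n + 2 * half ≤ n)
                by omega)]
          rw [List.getElem?_set, if_pos hji.symm, if_pos hset_len]
          have hji' : j - k * n = i := by omega
          rw [hji', ite_lt_eq_min]
        · -- a cell written later this loop: reads are below k*n, the write is at k*n+i
          have hlt1 : (k - 1) * n + (j - k * n) < k * n := by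
            have h1 : j - k * n < n := by omega
            have : (k - 1) * n + (j - k * n) < (k - 1) * n + n := by omega
            calc (k - 1) * n + (j - k * n) < (k - 1) * n + n := this
            _ = k * n := pred_mul_add k n hk
          have hlt2 : (k - 1) * n + (j - k * n) + half < k * n := by
            have h1 : j - k * n + half < n := by omega
            have : (k - 1) * n + (j - k * n + half) < (k - 1) * n + n := by omega
            calc (k - 1) * n + (j - k * n) + half = (k - 1) * n + (j - k * n + half) := by omega
            _ < (k - 1) * n + n := this
            _ = k * n := pred_mul_add k n hk
          rw [if_pos (show k * n + (i + 1) ≤ j ∧ j < (k + 1) * n ∧ j - k * n + 2 * half ≤ n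
                by omega)]
          rw [getD_set_ne _ _ _ _ (by omega), getD_set_ne _ _ _ _ (by omega)]
      · rw [if_neg hc]
        have hji : ¬ j = k * n + i := by
          intro hji
          apply hc
          refine ⟨by omega, ?_, by omega⟩
          have : i < n := by omega
          calc j = k * n + i := hji
          _ < k * n + n := by omega
          _ = (k + 1) * n := by ring
        rw [if_neg (show ¬(k * n + (i + 1) ≤ j ∧ j < (k + 1) * n ∧ j - k * n + 2 * half ≤ n)
              by omega)]
        rw [List.getElem?_set, if_neg (fun hx => hji hx.symm)]
    · rw [if_neg (show ¬((i : Int) + (half : Int) * 2 - 1 < (n : Int)) by omega)]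
      rw [if_neg (show ¬(k * n + i ≤ j ∧ j < (k + 1) * n ∧ j - k * n + 2 * half ≤ n) by omega)]
theorem outer_finish (arr : List Int) (K : Nat) (hn : 1 ≤ arr.length) (t : List Int)
    (hlen : t.length = K * arr.length)
    (hinv : ∀ j, j < K * arr.length →
        t[j]? = some (if j / arr.length < K then specCell arr arr.length j else 0)) :
    t = specList arr K arr.length := by
  apply List.ext_getElem?
  intro j
  by_cases hj : j < K * arr.length
  · rw [hinv j hj, if_pos (by rw [Nat.div_lt_iff_lt_mul (by omega)]; omega)]
    unfold specList
    rw [List.getElem?_map, List.getElem?_range hj]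
    rfl
  · rw [List.getElem?_eq_none (by omega),
        List.getElem?_eq_none (by simp [specList]; omega)]

theorem outerLoop_spec (arr : List Int) (K : Nat) (hn : 1 ≤ arr.length) :
    ∀ (m kd : Nat) (t : List Int), 1 ≤ kd → kd ≤ K → K - kd ≤ m →
    t.length = K * arr.length →
    (∀ j, j < K * arr.length →
        t[j]? = some (if j / arr.length < kd then specCell arr arr.length j else 0)) →
    outerLoop t (kd : Int) (K : Int) (arr.length : Int) = specList arr K arr.length := by
  intro m
  induction m with
  | zero =>
    intro kd t h1 h2 h3 hlen hinv
    have hkd : kd = K := by omega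
    subst hkd
    rw [outerLoop, if_neg (by omega)]
    exact outer_finish arr kd hn t hlen hinv
  | succ m ih =>
    intro kd t h1 h2 h3 hlen hinv
    by_cases hlt : kd < K
    · rw [outerLoop, if_pos (show (kd : Int) < (K : Int) by exact_mod_cast hlt)]
      rw [halfLoop_one kd h1]
      rw [show ((kd : Int) + 1) = ((kd + 1 : Nat) : Int) by push_cast; ring]
      have hh : 1 ≤ 2 ^ (kd - 1) := Nat.one_le_two_pow
      have h2h : 2 * 2 ^ (kd - 1) = 2 ^ kd := by rw [← pow_succ']; congr 1; omega
      have hsucc : (kd + 1) * arr.length = kd * arr.length + arr.length := by ring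
      have hKsucc : kd * arr.length + arr.length ≤ K * arr.length := by
        calc kd * arr.length + arr.length = (kd + 1) * arr.length := by ring
        _ ≤ K * arr.length := Nat.mul_le_mul_right _ (by omega)
      apply ih (kd + 1) _ (by omega) (by omega) (by omega)
      · rw [innerLoop_length arr.length _ _ _ _ _ (by omega), hlen]
      · intro j hj
        have hIL := innerLoop_getElem? kd arr.length (2 ^ (kd - 1)) h1 hh arr.length t 0 j
              (by omega) (by omega)
        simp only [Nat.cast_zero] at hIL
        rw [hIL]
        by_cases hc : kd * arr.length + 0 ≤ j ∧ j < (kd + 1) * arr.length ∧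
            j - kd * arr.length + 2 * 2 ^ (kd - 1) ≤ arr.length
        · rw [if_pos hc]
          obtain ⟨hc1, hc2, hc3⟩ := hc
          rw [h2h] at hc3
          have hi' : j - kd * arr.length < arr.length := by omega
          have hij : j = kd * arr.length + (j - kd * arr.length) := by omega
          -- first read: level kd-1, offset j - kd*n
          have hp1 : (kd - 1) * arr.length + (j - kd * arr.length) < kd * arr.length := by
            calc (kd - 1) * arr.length + (j - kd * arr.length)
                < (kd - 1) * arr.length + arr.length := by omega
            _ = kd * arr.length := pred_mul_add kd arr.length h1
          have hoff2 : j - kd * arr.length + 2 ^ (kd - 1) < arr.length := by omega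
          have hp2 : (kd - 1) * arr.length + (j - kd * arr.length) + 2 ^ (kd - 1)
              < kd * arr.length := by
            calc (kd - 1) * arr.length + (j - kd * arr.length) + 2 ^ (kd - 1)
                = (kd - 1) * arr.length + (j - kd * arr.length + 2 ^ (kd - 1)) := by omega
            _ < (kd - 1) * arr.length + arr.length := by omega
            _ = kd * arr.length := pred_mul_add kd arr.length h1
          have hd1 := div_mul_add_spec (kd - 1) arr.length (j - kd * arr.length) hn hi'
          have hd2 := div_mul_add_spec (kd - 1) arr.length
              (j - kd * arr.length + 2 ^ (kd - 1)) hn hoff2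
          have hread1 : t.getD ((kd - 1) * arr.length + (j - kd * arr.length)) 0
              = cell arr (kd - 1) (j - kd * arr.length) := by
            rw [List.getD_eq_getElem?_getD,
                hinv _ (by omega), Option.getD_some, if_pos (by omega)]
            unfold specCell
            rw [hd1.1, hd1.2]
          have hread2 : t.getD ((kd - 1) * arr.length + (j - kd * arr.length) + 2 ^ (kd - 1)) 0
              = cell arr (kd - 1) (j - kd * arr.length + 2 ^ (kd - 1)) := by
            rw [show (kd - 1) * arr.length + (j - kd * arr.length) + 2 ^ (kd - 1)
                  = (kd - 1) * arr.length + (j - kd * arr.length + 2 ^ (kd - 1)) by omega]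
            rw [List.getD_eq_getElem?_getD,
                hinv _ (by omega), Option.getD_some, if_pos (by omega)]
            unfold specCell
            rw [hd2.1, hd2.2]
          rw [hread1, hread2]
          have hdj := div_mul_add_spec kd arr.length (j - kd * arr.length) hn hi'
          have hdiv : j / arr.length = kd := by rw [hij]; exact hdj.1
          have hmodj : j % arr.length = j - kd * arr.length := by
            conv_lhs => rw [hij]
            exact hdj.2
          rw [if_pos (show j / arr.length < kd + 1 by omega)]
          congr 1
          have hdbl : min (cell arr (kd - 1) (j - kd * arr.length))
              (cell arr (kd - 1) (j - kd * arr.length + 2 ^ (kd - 1)))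
              = cell arr kd (j - kd * arr.length) := by
            have hc' := cell_doubling arr (kd - 1) (j - kd * arr.length)
              (by rw [show (kd - 1) + 1 = kd by omega]; omega)
            rwa [show (kd - 1) + 1 = kd by omega] at hc'
          rw [hdbl]
          unfold specCell
          rw [hdiv, hmodj]
        · rw [if_neg hc, hinv j hj]
          congr 1
          by_cases h5 : j / arr.length < kd
          · rw [if_pos h5, if_pos (by omega)]
          · by_cases h6 : j / arr.length = kd
            · have hmod := Nat.div_add_mod j arr.length
              rw [h6, Nat.mul_comm] at hmod
              have hjlo : kd * arr.length ≤ j := by omega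
              have hjhi : j < (kd + 1) * arr.length := by
                rw [← Nat.div_lt_iff_lt_mul (by omega), h6]; omega
              have hc3 : ¬ (j - kd * arr.length + 2 * 2 ^ (kd - 1) ≤ arr.length) := by
                intro hx
                exact hc ⟨by omega, hjhi, hx⟩
              rw [h2h] at hc3
              rw [if_neg h5, if_pos (by omega)]
              unfold specCell
              rw [h6]
              unfold cell
              rw [if_neg (by omega)]
            · rw [if_neg h5, if_neg (by omega)]
    · rw [outerLoop, if_neg (show ¬ (kd : Int) < (K : Int) by exact_mod_cast hlt)]
      have hkd : kd = K := by omega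
      subst hkd
      exact outer_finish arr kd hn t hlen hinv
theorem A_eq_spec (arr : List Int) (h : arr ≠ []) :
    build_sparse_table arr = specList arr (Nat.log2 arr.length + 1) arr.length := by
  have hn : 0 < arr.length := List.length_pos_of_ne_nil h
  show (if (arr.length : Int) = 0 then ([] : List Int) else
      outerLoop
        (copyLoop arr
          (zeroLoop [] 0 ((log2_floor (arr.length : Int) + 1) * (arr.length : Int)))
          0 (arr.length : Int))
        1 (log2_floor (arr.length : Int) + 1) (arr.length : Int))
      = specList arr (Nat.log2 arr.length + 1) arr.length
  rw [if_neg (show ¬ ((arr.length : Int)) = 0 by exact_mod_cast Nat.pos_iff_ne_zero.mp hn)]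
  rw [log2_floor_natCast arr.length hn]
  rw [show ((Nat.log2 arr.length : Int) + 1) = ((Nat.log2 arr.length + 1 : Nat) : Int) by
        push_cast; ring]
  have hcm : (((Nat.log2 arr.length + 1 : Nat) : Int)) * (arr.length : Int)
      = (((Nat.log2 arr.length + 1) * arr.length : Nat) : Int) := by push_cast; ring
  rw [zeroLoop_spec ((Nat.log2 arr.length + 1) * arr.length) []
        0 (((Nat.log2 arr.length + 1 : Nat) : Int) * (arr.length : Int)) (by rw [hcm]; omega)]
  rw [show ((((Nat.log2 arr.length + 1 : Nat) : Int)) * (arr.length : Int) - 0).toNat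
        = (Nat.log2 arr.length + 1) * arr.length by rw [hcm]; omega]
  rw [List.nil_append]
  rw [show ((1 : Int)) = ((1 : Nat) : Int) by rfl]
  apply outerLoop_spec arr (Nat.log2 arr.length + 1) hn (Nat.log2 arr.length + 1) 1 _
      (by omega) (by omega) (by omega)
  · rw [copyLoop_length arr arr.length _ 0 (arr.length : Int) (by omega), List.length_replicate]
  · intro j hj
    have hcl := copyLoop_getElem? arr arr.length (List.replicate ((Nat.log2 arr.length + 1) * arr.length) 0)
        0 (by omega) (by rw [List.length_replicate]; nlinarith) (by omega) j
    rw [hcl]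
    by_cases hjn : j < arr.length
    · rw [if_pos ⟨by omega, hjn⟩]
      rw [if_pos (show j / arr.length < 1 by rw [Nat.div_lt_iff_lt_mul hn]; omega)]
      unfold specCell
      rw [Nat.div_eq_of_lt hjn, Nat.mod_eq_of_lt hjn, cell_zero arr j hjn]
      rw [List.getElem?_eq_getElem hjn, List.getD_eq_getElem?_getD,
          List.getElem?_eq_getElem hjn]
      rfl
    · rw [if_neg (by omega)]
      rw [if_neg (show ¬ j / arr.length < 1 by
            rw [Nat.div_lt_iff_lt_mul hn]; omega)]
      rw [List.getElem?_replicate, if_pos hj]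

-- ===== VERDICT (by name: the statement is the Claim_ definition above) =====
theorem build_sparse_table_spec : Claim_equal_build_sparse_table := by
  intro arr _
  unfold Spec_build_sparse_table
  by_cases h : arr = []
  · subst h; rfl
  · rw [A_eq_spec arr h, alt_eq_spec arr h]
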